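-- pv_equiv track=rewrite | github.com/AlexanderHuynhKoehler/ai_music | Orchestrator.py | _get_fallback_progression
-- ===== SOURCE A (Python) =====
-- from typing import List
--
-- def _get_fallback_progression(num_phrases: int, style: str) -> List[str]:
--     """Generate fallback chord progressions."""
--
--     style_progressions = {
--         'pop': ['Cmaj', 'Amin', 'Fmaj', 'Gmaj'],
--         'rock': ['Emin', 'Cmaj', 'Gmaj', 'Dmaj'],
--         'jazz': ['Cmaj7', 'A7', 'Dmin7', 'G7'],
--         'blues': ['C7', 'F7', 'G7', 'C7'],
--         'electronic': ['Amin', 'Fmaj', 'Cmaj', 'Gmaj'],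
--         'classical': ['Cmaj', 'Gmaj', 'Amin', 'Fmaj']
--     }
--
--     base_progression = style_progressions.get(style.lower(), ['Cmaj', 'Fmaj', 'Gmaj', 'Cmaj'])
--     result = []
--     for i in range(num_phrases):
--         result.append(base_progression[i % len(base_progression)])
--     return result
-- ===== SOURCE B (Python) =====
-- from typing import List
--
-- def _get_fallback_progression(num_phrases: int, style: str) -> List[str]:
--     """Generate fallback chord progressions (rotating-queue construction)."""
--     style_progressions = {
--         'pop': ['Cmaj', 'Amin', 'Fmaj', 'Gmaj'],
--         'rock': ['Emin', 'Cmaj', 'Gmaj', 'Dmaj'],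
--         'jazz': ['Cmaj7', 'A7', 'Dmin7', 'G7'],
--         'blues': ['C7', 'F7', 'G7', 'C7'],
--         'electronic': ['Amin', 'Fmaj', 'Cmaj', 'Gmaj'],
--         'classical': ['Cmaj', 'Gmaj', 'Amin', 'Fmaj']
--     }
--     rot = list(style_progressions.get(style.lower(), ['Cmaj', 'Fmaj', 'Gmaj', 'Cmaj']))
--     result = []
--     for _ in range(num_phrases):
--         head = rot.pop(0)
--         result.append(head)
--         rot.append(head)
--     return result
-- ===== Notes on version B (the rewrite author's own statement) =====
-- stated objective: alternative
-- what changed: Instead of indexing the base progression by i % len(base), B maintains the progression as a rotating queue: each iteration pops the front chord, emits it, and pushes it to the back, so no index arithmetic or modulo is used.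
import Mathlib
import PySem

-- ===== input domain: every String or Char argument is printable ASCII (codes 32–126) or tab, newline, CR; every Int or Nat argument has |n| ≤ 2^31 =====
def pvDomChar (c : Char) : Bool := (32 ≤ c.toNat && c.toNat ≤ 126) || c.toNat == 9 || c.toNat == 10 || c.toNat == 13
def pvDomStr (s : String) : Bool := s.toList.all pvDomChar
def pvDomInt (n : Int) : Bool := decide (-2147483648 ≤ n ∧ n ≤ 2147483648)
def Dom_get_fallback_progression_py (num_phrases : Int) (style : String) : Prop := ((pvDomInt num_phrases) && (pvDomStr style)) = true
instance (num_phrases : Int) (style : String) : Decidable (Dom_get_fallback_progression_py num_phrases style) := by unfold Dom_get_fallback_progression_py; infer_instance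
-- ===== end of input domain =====

-- B replaces A's i % len(base) indexing loop by a rotating queue (pop front, emit, push back) — objective: alternative.

-- ===== PORT A =====
-- the style dict, shared literal of both Pythons
def pvStyleProgs : PySem.Dict String (List String) := PySem.Dict.ofList
  [("pop", ["Cmaj","Amin","Fmaj","Gmaj"]),
   ("rock", ["Emin","Cmaj","Gmaj","Dmaj"]),
   ("jazz", ["Cmaj7","A7","Dmin7","G7"]),
   ("blues", ["C7","F7","G7","C7"]),
   ("electronic", ["Amin","Fmaj","Cmaj","Gmaj"]),
   ("classical", ["Cmaj","Gmaj","Amin","Fmaj"])]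

def get_fallback_progression_py (num_phrases : Int) (style : String) : List String :=
  let base_progression := pvStyleProgs.getD (PySem.Str.lower style) ["Cmaj","Fmaj","Gmaj","Cmaj"]
  -- for i in range(num_phrases): result.append(base_progression[i % len(base_progression)])
  -- pyGetD is exact here: len(base) = 4 > 0, so i % len is always in range
  (PySem.List.pyRange 0 num_phrases).foldl
    (fun result i => result ++
      [PySem.List.pyGetD base_progression (PySem.Int.mod i (PySem.List.len base_progression)) ""]) []

-- ===== PORT B =====
def get_fallback_progression_py_alt (num_phrases : Int) (style : String) : List String :=
  let rot0 := pvStyleProgs.getD (PySem.Str.lower style) ["Cmaj","Fmaj","Gmaj","Cmaj"]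
  -- for _ in range(num_phrases): head = rot.pop(0); result.append(head); rot.append(head)
  -- pop? is exact: rot starts with 4 elements and keeps its length, so pop(0) never raises
  ((PySem.List.pyRange 0 num_phrases).foldl
    (fun (st : List String × List String) _ =>
      match PySem.List.pop? st.2 0 with
      | some (head, rest) => (st.1 ++ [head], rest ++ [head])
      | none => st)
    ([], rot0)).1

-- ===== PRECONDITION & SPEC =====
def Spec_get_fallback_progression_py (num_phrases : Int) (style : String) (out : List String) : Prop := out = get_fallback_progression_py_alt num_phrases style
instance (num_phrases : Int) (style : String) (out : List String) : Decidable (Spec_get_fallback_progression_py num_phrases style out) := by unfold Spec_get_fallback_progression_py; infer_instance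

-- ===== CLAIM =====
def Claim_equal_get_fallback_progression_py : Prop := ∀ (num_phrases : Int) (style : String), Dom_get_fallback_progression_py num_phrases style → Spec_get_fallback_progression_py num_phrases style (get_fallback_progression_py num_phrases style)

-- ===== LEMMAS AND PROOFS =====

-- whatever the dict lookup yields, it has length 4
theorem pv_base_len (s : String) :
    (pvStyleProgs.getD s ["Cmaj","Fmaj","Gmaj","Cmaj"]).length = 4 := by
  have h : pvStyleProgs = PySem.Dict.mk
    [("pop", ["Cmaj","Amin","Fmaj","Gmaj"]),
     ("rock", ["Emin","Cmaj","Gmaj","Dmaj"]),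
     ("jazz", ["Cmaj7","A7","Dmin7","G7"]),
     ("blues", ["C7","F7","G7","C7"]),
     ("electronic", ["Amin","Fmaj","Cmaj","Gmaj"]),
     ("classical", ["Cmaj","Gmaj","Amin","Fmaj"])] := rfl
  rw [h]
  simp only [PySem.Dict.getD, PySem.Dict.get?_mk_cons]
  split_ifs <;> rfl

-- B's rotating-queue loop over range m: result = the cycled map, queue = base rotated m times
theorem pv_rot_loop (base : List String) (h4 : base.length = 4) (m : ℕ) :
    (List.range m).foldl
      (fun (st : List String × List String) (_ : ℕ) =>
        match PySem.List.pop? st.2 0 with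
        | some (head, rest) => (st.1 ++ [head], rest ++ [head])
        | none => st)
      ([], base) =
    ((List.range m).map (fun k => base.getD (k % 4) ""), base.rotate m) := by
  induction m with
  | zero => simp
  | succ m ih =>
    rw [List.range_succ, List.foldl_append, ih]
    have hlen : (base.rotate m).length = 4 := by simp [h4]
    obtain ⟨h, t, ht⟩ : ∃ h t, base.rotate m = h :: t := by
      cases hrm : base.rotate m with
      | nil => rw [hrm] at hlen; simp at hlen
      | cons h t => exact ⟨h, t, rfl⟩
    simp only [List.foldl_cons, List.foldl_nil, ht, PySem.List.pop?_zero_cons]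
    have hh : h = base.getD (m % 4) "" := by
      have h0 : (base.rotate m)[0]'(by omega) = h := by simp [ht]
      rw [List.getElem_rotate] at h0
      rw [← h0, List.getD_eq_getElem base "" (by omega)]
      simp [h4]
    have hrot : t ++ [h] = base.rotate (m + 1) := by
      have : (base.rotate m).rotate 1 = base.rotate (m + 1) := List.rotate_rotate base m 1
      rw [← this, ht, List.rotate_cons_succ, List.rotate_zero]
    rw [List.map_append, List.map_cons, List.map_nil, ← hh, hrot]

-- A's loop = B's loop result, for any length-4 base
theorem pv_cyc (base : List String) (h4 : base.length = 4) (n : Int) :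
    (PySem.List.pyRange 0 n).foldl
      (fun result i => result ++
        [PySem.List.pyGetD base (PySem.Int.mod i (PySem.List.len base)) ""]) [] =
    ((PySem.List.pyRange 0 n).foldl
      (fun (st : List String × List String) _ =>
        match PySem.List.pop? st.2 0 with
        | some (head, rest) => (st.1 ++ [head], rest ++ [head])
        | none => st)
      ([], base)).1 := by
  have hlen : PySem.List.len base = (4 : Int) := by simp [PySem.List.len_eq, h4]
  rcases le_or_gt n 0 with hn | hn
  · have hr : PySem.List.pyRange 0 n = [] := by
      rw [PySem.List.pyRange_one]; simp; omega
    rw [hr]; rfl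
  · obtain ⟨m, rfl⟩ : ∃ m : ℕ, n = (m : Int) := ⟨n.toNat, (Int.toNat_of_nonneg (by omega)).symm⟩
    rw [hlen, PySem.List.pyRange_zero_natCast, List.foldl_map, List.foldl_map,
        PySem.List.foldl_append_singleton_eq_map, List.nil_append, pv_rot_loop base h4 m]
    apply List.map_congr_left
    intro k _
    have hmod : PySem.Int.mod (k : Int) 4 = ((k % 4 : ℕ) : Int) := by
      exact_mod_cast PySem.Int.mod_natCast k 4
    rw [hmod, PySem.List.pyGetD_natCast]

-- ===== VERDICT =====
theorem get_fallback_progression_py_spec : Claim_equal_get_fallback_progression_py := by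
  intro num_phrases style _
  unfold Spec_get_fallback_progression_py
  unfold get_fallback_progression_py get_fallback_progression_py_alt
  exact pv_cyc _ (pv_base_len (PySem.Str.lower style)) num_phrases
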